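-- pv_equiv track=rewrite | github.com/archit119/Documentation-Viewer-Portal | ZIP Files/backend/services/openai_service.py | _reorder_sections
-- ===== SOURCE A (Python) =====
-- def _reorder_sections(sections):
--     """Reorder sections in logical sequence"""
--     # Define preferred order
--     order_priority = {
--         'project overview': 1,
--         'key features': 2,
--         'technology stack': 3,
--         'architecture': 4,
--         'directory structure': 5,
--         'components': 6,
--         'modules': 6,
--         'data flow': 7,
--         'api': 8,
--         'installation': 9,
--         'setup': 10,
--         'configuration': 11,
--         'getting started': 12,
--         'tutorial': 13,
--         'usage': 14,
--         'examples': 15,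
--         'code walkthrough': 16,
--         'security': 17,
--         'testing': 18,
--         'deployment': 19,
--         'troubleshooting': 20,
--         'performance': 21,
--         'maintenance': 22
--     }
--
--     def get_order_score(section_title):
--         title_lower = section_title.lower()
--         for keyword, score in order_priority.items():
--             if keyword in title_lower:
--                 return score
--         return 999  # Put unknown sections at the end
--
--     # Sort sections by logical order
--     sections.sort(key=lambda x: get_order_score(x['title']))
--     return sections
-- ===== SOURCE B (Python) =====
-- # Multi-pass stable partition: walk the priority keyword groups in order; each pass
-- # pulls the matching sections out of the remaining ones (original order preserved),
-- # leftovers go last. No scores are ever computed and nothing is sorted.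
-- _GROUPS = [
--     ['project overview'],
--     ['key features'],
--     ['technology stack'],
--     ['architecture'],
--     ['directory structure'],
--     ['components', 'modules'],
--     ['data flow'],
--     ['api'],
--     ['installation'],
--     ['setup'],
--     ['configuration'],
--     ['getting started'],
--     ['tutorial'],
--     ['usage'],
--     ['examples'],
--     ['code walkthrough'],
--     ['security'],
--     ['testing'],
--     ['deployment'],
--     ['troubleshooting'],
--     ['performance'],
--     ['maintenance'],
-- ]
--
--
-- def _reorder_sections(sections):
--     """Reorder sections by repeated stable partition over the priority groups."""
--     ordered = []
--     remaining = list(sections)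
--     for keywords in _GROUPS:
--         taken = []
--         rest = []
--         for sec in remaining:
--             title = sec['title'].lower()
--             if any(kw in title for kw in keywords):
--                 taken.append(sec)
--             else:
--                 rest.append(sec)
--         ordered += taken
--         remaining = rest
--     sections[:] = ordered + remaining
--     return sections
-- ===== Notes on version B (the rewrite author's own statement) =====
-- stated objective: alternative
-- what changed: B never computes scores and never sorts: it walks the 22 priority keyword groups (group position = priority; ties like components/modules share one group) and performs a stable partition pass per group, pulling matching sections out of the remaining ones in original order and appending the unmatched leftovers last.
import Mathlib
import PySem

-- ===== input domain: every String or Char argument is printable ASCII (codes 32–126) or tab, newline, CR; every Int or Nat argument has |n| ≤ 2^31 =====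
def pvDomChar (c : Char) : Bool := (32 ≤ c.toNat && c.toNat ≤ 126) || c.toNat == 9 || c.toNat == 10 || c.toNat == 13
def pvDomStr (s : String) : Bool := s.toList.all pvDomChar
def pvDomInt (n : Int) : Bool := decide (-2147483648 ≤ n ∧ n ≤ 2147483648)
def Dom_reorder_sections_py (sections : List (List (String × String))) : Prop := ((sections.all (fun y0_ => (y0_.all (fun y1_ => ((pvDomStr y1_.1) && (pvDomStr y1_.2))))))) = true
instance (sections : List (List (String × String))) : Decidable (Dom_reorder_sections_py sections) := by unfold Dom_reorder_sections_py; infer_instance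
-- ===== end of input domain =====

-- B replaces A's stable key-sort by a multi-pass stable partition over the priority
-- keyword groups, computing no scores and sorting nothing (objective: alternative).
-- Both Pythons mutate `sections` in place and leave it holding exactly the returned
-- list, so the side effect coincides and the theorems are about the returned value.

-- ===== PORT A =====
-- the literal key/value pairs of A's dict `order_priority`, in insertion order
def pvPriorityTable : List (String × Int) :=
  [("project overview", 1), ("key features", 2), ("technology stack", 3), ("architecture", 4),
   ("directory structure", 5), ("components", 6), ("modules", 6), ("data flow", 7),
   ("api", 8), ("installation", 9), ("setup", 10), ("configuration", 11),
   ("getting started", 12), ("tutorial", 13), ("usage", 14), ("examples", 15),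
   ("code walkthrough", 16), ("security", 17), ("testing", 18), ("deployment", 19),
   ("troubleshooting", 20), ("performance", 21), ("maintenance", 22)]

-- `sec['title']` (first match in the association list; Pre_ guarantees the key is present,
-- so the `getD ""` default is never taken on admitted inputs)
def pvTitleA (sec : List (String × String)) : String :=
  ((sec.find? (fun p => p.1 == "title")).map (·.2)).getD ""

-- `get_order_score`: scan order_priority.items() and return the first score whose
-- keyword occurs in the lowercased title, else 999
def getOrderScoreA (titleLower : String) : List (String × Int) → Int
  | [] => 999
  | (keyword, score) :: rest =>
      if PySem.Str.isIn keyword titleLower then score else getOrderScoreA titleLower rest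

def reorder_sections_py (sections : List (List (String × String))) : List (List (String × String)) :=
  PySem.List.sorted sections (fun x => getOrderScoreA (PySem.Str.lower (pvTitleA x)) pvPriorityTable) false

-- ===== PORT B =====
-- B's _GROUPS: group position is the priority, tied keywords share a group
def pvGroups : List (List String) :=
  [["project overview"], ["key features"], ["technology stack"], ["architecture"],
   ["directory structure"], ["components", "modules"], ["data flow"], ["api"],
   ["installation"], ["setup"], ["configuration"], ["getting started"], ["tutorial"],
   ["usage"], ["examples"], ["code walkthrough"], ["security"], ["testing"],
   ["deployment"], ["troubleshooting"], ["performance"], ["maintenance"]]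

-- `sec['title']` written as B reads it: scan for the first "title" key
def pvTitleB : List (String × String) → String
  | [] => ""
  | (k, v) :: rest => if k == "title" then v else pvTitleB rest

-- `any(kw in title for kw in keywords)` on the lowercased title
def pvHit (keywords : List String) (sec : List (String × String)) : Bool :=
  keywords.any (fun kw => PySem.Str.isIn kw (PySem.Str.lower (pvTitleB sec)))

-- the per-group partition passes: taken ++ (recurse on rest), leftovers last
def pvDistribute : List (List String) → List (List (String × String)) → List (List (String × String))
  | [], remaining => remaining
  | keywords :: more, remaining =>
      let part := remaining.partition (pvHit keywords)
      part.1 ++ pvDistribute more part.2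

def reorder_sections_py_alt (sections : List (List (String × String))) : List (List (String × String)) :=
  pvDistribute pvGroups sections

-- ===== PRECONDITION & SPEC =====
-- Pre_ excludes sections lacking a "title" key, on which A raises KeyError (so does B).
def Pre_reorder_sections_py (sections : List (List (String × String))) : Prop :=
  (sections.all (fun sec => sec.any (fun p => p.1 == "title"))) = true
instance (sections : List (List (String × String))) : Decidable (Pre_reorder_sections_py sections) := by
  unfold Pre_reorder_sections_py; infer_instance

def pvWitness_reorder_sections_py : (List (List (String × String))) :=
  [[("title", "API Reference")], [("title", "Project Overview"), ("content", "x")], [("title", "misc")]]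

def Spec_reorder_sections_py (sections : List (List (String × String))) (out : List (List (String × String))) : Prop := out = reorder_sections_py_alt sections
instance (sections : List (List (String × String))) (out : List (List (String × String))) : Decidable (Spec_reorder_sections_py sections out) := by unfold Spec_reorder_sections_py; infer_instance

-- ===== CLAIM (what is proved, stated in full; the proofs are below) =====
def Claim_equal_reorder_sections_py : Prop := ∀ (sections : List (List (String × String))), Dom_reorder_sections_py sections → Pre_reorder_sections_py sections → Spec_reorder_sections_py sections (reorder_sections_py sections)

-- ===== LEMMAS AND PROOFS =====

-- proof-side: groups re-annotated with their priority levels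
def pvTable : List (Int × List String) :=
  [(1, ["project overview"]), (2, ["key features"]), (3, ["technology stack"]),
   (4, ["architecture"]), (5, ["directory structure"]), (6, ["components", "modules"]),
   (7, ["data flow"]), (8, ["api"]), (9, ["installation"]), (10, ["setup"]),
   (11, ["configuration"]), (12, ["getting started"]), (13, ["tutorial"]), (14, ["usage"]),
   (15, ["examples"]), (16, ["code walkthrough"]), (17, ["security"]), (18, ["testing"]),
   (19, ["deployment"]), (20, ["troubleshooting"]), (21, ["performance"]), (22, ["maintenance"])]

def pvFlat (T : List (Int × List String)) : List (String × Int) :=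
  T.flatMap (fun p => p.2.map (fun k => (k, p.1)))

-- first level whose group has a keyword occurring in t, else 999
def pvFirstLevel : List (Int × List String) → String → Int
  | [], _ => 999
  | (l, kws) :: rest, t =>
      if kws.any (fun kw => PySem.Str.isIn kw t) then l else pvFirstLevel rest t

theorem pvScoreFlatBlock (t : String) (l : Int) (kws : List String) (rest : List (String × Int)) :
    getOrderScoreA t (kws.map (fun k => (k, l)) ++ rest)
      = if kws.any (fun kw => PySem.Str.isIn kw t) then l else getOrderScoreA t rest := by
  induction kws with
  | nil => simp
  | cons k ks ih =>
    simp only [List.map_cons, List.cons_append, getOrderScoreA, List.any_cons]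
    by_cases h : PySem.Str.isIn k t = true
    · simp only [h, if_true, Bool.true_or]
    · have hf : PySem.Str.isIn k t = false := by revert h; cases PySem.Str.isIn k t <;> simp
      simp only [hf, Bool.false_eq_true, if_false, Bool.false_or, ih]

theorem pvScoreGrouped (T : List (Int × List String)) (t : String) :
    getOrderScoreA t (pvFlat T) = pvFirstLevel T t := by
  induction T with
  | nil => rfl
  | cons hd rest ih =>
    obtain ⟨l, kws⟩ := hd
    simp only [pvFlat, List.flatMap_cons, pvFirstLevel]
    rw [pvScoreFlatBlock]
    simp only [pvFlat] at ih
    rw [ih]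

theorem pvFirstLevelMem (T : List (Int × List String)) (t : String) :
    pvFirstLevel T t = 999 ∨ pvFirstLevel T t ∈ T.map (fun p => p.1) := by
  induction T with
  | nil => exact Or.inl rfl
  | cons hd rest ih =>
    obtain ⟨l, kws⟩ := hd
    simp only [pvFirstLevel]
    by_cases h : kws.any (fun kw => PySem.Str.isIn kw t) = true
    · rw [if_pos h]; exact Or.inr (by simp)
    · rw [if_neg h]
      rcases ih with h1 | h1
      · exact Or.inl h1
      · exact Or.inr (by simp only [List.map_cons]; exact List.mem_cons_of_mem _ h1)

-- the multi-pass partition is the concatenation of the first-level buckets, levels ascending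
theorem pvDistEq (T : List (Int × List String))
    (hstrict : (T.map (fun p => p.1)).Pairwise (· < ·))
    (hb : ∀ l ∈ T.map (fun p => p.1), l < 999) :
    ∀ xs, pvDistribute (T.map (fun p => p.2)) xs
      = (T.map (fun p => p.1) ++ [(999 : Int)]).flatMap
          (fun l => xs.filter (fun x => pvFirstLevel T (PySem.Str.lower (pvTitleB x)) == l)) := by
  induction T with
  | nil =>
    intro xs
    simp [pvDistribute, pvFirstLevel]
  | cons hd rest ih =>
    obtain ⟨l, kws⟩ := hd
    intro xs
    have hlt : ∀ a ∈ rest.map (fun p => p.1), l < a := (List.pairwise_cons.mp hstrict).1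
    have htail := (List.pairwise_cons.mp hstrict).2
    have hl999 : l < 999 := hb l (by simp)
    simp only [List.map_cons, pvDistribute, List.partition_eq_filter_filter, List.cons_append,
      List.flatMap_cons]
    rw [ih htail (fun a ha => hb a (by simp [ha]))]
    congr 1
    · -- first bucket: hit at this group ⟺ first level equals l
      apply List.filter_congr
      intro x _
      rw [show pvFirstLevel ((l, kws) :: rest) (PySem.Str.lower (pvTitleB x))
            = if pvHit kws x then l else pvFirstLevel rest (PySem.Str.lower (pvTitleB x)) from rfl]
      cases h : pvHit kws x
      · rcases pvFirstLevelMem rest (PySem.Str.lower (pvTitleB x)) with h1 | h1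
        · simp only [Bool.false_eq_true, if_false, h1]
          simp; omega
        · have := hlt _ h1
          simp only [Bool.false_eq_true, if_false]
          simp; omega
      · simp
    · -- later buckets: survivors of this pass, first level read from the tail table
      apply List.flatMap_congr
      intro l' hl'
      have hne : l ≠ l' := by
        rcases List.mem_append.mp hl' with h1 | h1
        · have := hlt _ h1; omega
        · simp only [List.mem_singleton] at h1; omega
      rw [List.filter_filter]
      apply List.filter_congr
      intro x _
      rw [show pvFirstLevel ((l, kws) :: rest) (PySem.Str.lower (pvTitleB x))
            = if pvHit kws x then l else pvFirstLevel rest (PySem.Str.lower (pvTitleB x)) from rfl]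
      cases h : pvHit kws x
      · simp [h]
      · simp [h, hne]

-- the two readings of sec['title'] agree
theorem pvTitleEq (sec : List (String × String)) : pvTitleA sec = pvTitleB sec := by
  induction sec with
  | nil => rfl
  | cons hd rest ih =>
    obtain ⟨k, v⟩ := hd
    by_cases h : k == "title"
    · simp [pvTitleA, pvTitleB, List.find?, h]
    · simp only [pvTitleB, h, if_false, Bool.false_eq_true]
      rw [← ih]
      simp [pvTitleA, List.find?, h]

-- A's score is 999 or one of the table's scores
theorem pvScoreMem (t : String) (ps : List (String × Int)) :
    getOrderScoreA t ps = 999 ∨ getOrderScoreA t ps ∈ ps.map (·.2) := by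
  induction ps with
  | nil => exact Or.inl rfl
  | cons hd rest ih =>
    obtain ⟨kw, s⟩ := hd
    simp only [getOrderScoreA]
    by_cases hin : PySem.Str.isIn kw t = true
    · rw [if_pos hin]
      exact Or.inr (by simp)
    · rw [if_neg hin]
      rcases ih with h | h
      · exact Or.inl h
      · exact Or.inr (by simp only [List.map_cons]; exact List.mem_cons_of_mem _ h)

-- insertBy walks past a block it does not go before
theorem pvInsertByAppend {α : Type} (before : α → α → Bool) (x : α) (as bs : List α)
    (h : ∀ y ∈ as, before x y = false) :
    PySem.List.insertBy before x (as ++ bs) = as ++ PySem.List.insertBy before x bs := by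
  induction as with
  | nil => rfl
  | cons a t ih =>
    simp only [List.cons_append, PySem.List.insertBy, h a (by simp)]
    simp only [Bool.false_eq_true, if_false, List.cons.injEq, true_and]
    exact ih (fun y hy => h y (by simp [hy]))

-- insertBy stops immediately before a block it goes before entirely
theorem pvInsertByFront {α : Type} (before : α → α → Bool) (x : α) (bs : List α)
    (h : ∀ y ∈ bs, before x y = true) :
    PySem.List.insertBy before x bs = x :: bs := by
  cases bs with
  | nil => rfl
  | cons b t => simp [PySem.List.insertBy, h b (by simp)]

-- inserting x into a concatenation of buckets with strictly increasing levels appends x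
-- at the end of its own bucket
theorem pvInsertByFlatMap {α : Type} (key : α → Int) (x : α) (L : List Int) (g : Int → List α)
    (hstrict : L.Pairwise (· < ·)) (hx : key x ∈ L)
    (hg : ∀ l ∈ L, ∀ y ∈ g l, key y = l) :
    PySem.List.insertBy (fun a b => decide (key a < key b)) x (L.flatMap g)
      = L.flatMap (fun l => g l ++ if key x == l then [x] else []) := by
  induction L with
  | nil => cases hx
  | cons l L' ih =>
    have hgl : ∀ y ∈ g l, key y = l := hg l (by simp)
    have hgL' : ∀ l' ∈ L', ∀ y ∈ g l', key y = l' := fun l' hl' => hg l' (by simp [hl'])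
    have hlt : ∀ a ∈ L', l < a := (List.pairwise_cons.mp hstrict).1
    have htail := (List.pairwise_cons.mp hstrict).2
    simp only [List.flatMap_cons]
    by_cases hxl : key x = l
    · rw [pvInsertByAppend _ _ _ _ (fun y hy => by
        rw [hgl y hy, hxl]; simp)]
      rw [pvInsertByFront _ _ _ (fun y hy => by
        simp only [List.mem_flatMap] at hy
        obtain ⟨l', hl', hyl'⟩ := hy
        rw [hgL' l' hl' y hyl', hxl]
        simp [hlt l' hl'])]
      have hrest : L'.flatMap (fun l' => g l' ++ if key x == l' then [x] else [])
          = L'.flatMap g := by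
        apply List.flatMap_congr
        intro l' hl'
        have : key x ≠ l' := by have := hlt l' hl'; omega
        simp [this]
      rw [hrest, if_pos (by simp [hxl])]
      simp
    · have hxL' : key x ∈ L' := by
        rcases List.mem_cons.mp hx with h | h
        · exact absurd h hxl
        · exact h
      rw [pvInsertByAppend _ _ _ _ (fun y hy => by
        rw [hgl y hy]
        have := hlt (key x) hxL'
        simp; omega)]
      rw [ih htail hxL' hgL', if_neg (by simp [hxl])]
      simp

-- the stable sort by an Int key is the concatenation of the key-level buckets, levels ascending
theorem pvSortedEqFlatMap {α : Type} (key : α → Int) (L : List Int)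
    (hstrict : L.Pairwise (· < ·)) (xs : List α) (hmem : ∀ x ∈ xs, key x ∈ L) :
    PySem.List.sorted xs key false = L.flatMap (fun l => xs.filter (fun x => key x == l)) := by
  induction xs using List.reverseRecOn with
  | nil => simp [PySem.List.sorted]
  | append_singleton ys x ih =>
    rw [PySem.List.sorted_eq_foldl_insertBy, List.foldl_append, List.foldl_cons, List.foldl_nil,
      ← PySem.List.sorted_eq_foldl_insertBy]
    rw [ih (fun y hy => hmem y (by simp [hy]))]
    rw [pvInsertByFlatMap key x L _ hstrict (hmem x (by simp))
      (fun l _ y hy => by simpa using (List.mem_filter.mp hy).2)]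
    apply List.flatMap_congr
    intro l _
    rw [List.filter_append]
    simp [List.filter_cons]

-- ===== VERDICT (by name: the statement is the Claim_ definition above) =====
theorem reorder_sections_py_spec : Claim_equal_reorder_sections_py := by
  intro sections _ _
  unfold Spec_reorder_sections_py reorder_sections_py reorder_sections_py_alt
  have hkey : ∀ x : List (String × String),
      getOrderScoreA (PySem.Str.lower (pvTitleA x)) pvPriorityTable
        = pvFirstLevel pvTable (PySem.Str.lower (pvTitleB x)) := by
    intro x
    rw [pvTitleEq]
    have hflat : pvPriorityTable = pvFlat pvTable := by decide
    rw [hflat, pvScoreGrouped]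
  have hgroups : pvGroups = pvTable.map (·.2) := by decide
  rw [hgroups, pvDistEq pvTable (by decide) (by decide)]
  have hlev : pvTable.map (fun p => p.1) ++ [(999 : Int)]
      = ([1, 2, 3, 4, 5, 6, 7, 8, 9, 10, 11, 12, 13, 14, 15, 16, 17, 18, 19, 20, 21, 22, 999] : List Int) := by
    decide
  rw [hlev]
  rw [pvSortedEqFlatMap (fun x => getOrderScoreA (PySem.Str.lower (pvTitleA x)) pvPriorityTable)
    ([1, 2, 3, 4, 5, 6, 7, 8, 9, 10, 11, 12, 13, 14, 15, 16, 17, 18, 19, 20, 21, 22, 999] : List Int)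
    (by decide) sections ?hmem]
  case hmem =>
    intro x _
    show getOrderScoreA (PySem.Str.lower (pvTitleA x)) pvPriorityTable
      ∈ ([1, 2, 3, 4, 5, 6, 7, 8, 9, 10, 11, 12, 13, 14, 15, 16, 17, 18, 19, 20, 21, 22, 999] : List Int)
    rcases pvScoreMem (PySem.Str.lower (pvTitleA x)) pvPriorityTable with h | h
    · rw [h]; decide
    · revert h
      have : ∀ s ∈ pvPriorityTable.map (·.2),
          s ∈ ([1, 2, 3, 4, 5, 6, 7, 8, 9, 10, 11, 12, 13, 14, 15, 16, 17, 18, 19, 20, 21, 22, 999] : List Int) := by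
        decide
      exact fun h => this _ h
  apply List.flatMap_congr
  intro l _
  apply List.filter_congr
  intro x _
  rw [hkey]
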